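-- pv_equiv track=rewrite | github.com/gigigimay/ChordsHouse | utilities/transposer.py | recursive_line_transpose
-- ===== SOURCE A (Python) =====
-- key_list = [('A',), ('A#', 'Bb'), ('B',), ('C',), ('C#', 'Db'), ('D',),
--             ('D#', 'Eb'), ('E',), ('F',), ('F#', 'Gb'), ('G',), ('G#', 'Ab')]
--
-- sharp_flat = ['#', 'b']
--
-- sharp_flat_preferences = {
--     'A': '#',
--     'A#': 'b',
--     'Bb': 'b',
--     'B': '#',
--     'C': 'b',
--     'C#': 'b',
--     'Db': 'b',
--     'D': '#',
--     'D#': 'b',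
--     'Eb': 'b',
--     'E': '#',
--     'F': 'b',
--     'F#': '#',
--     'Gb': '#',
--     'G': '#',
--     'G#': 'b',
--     'Ab': 'b',
-- }
--
-- def get_index_from_key(source_key):
--     """Gets the internal index of a key
--     >>> get_index_from_key('Bb')
--     1
--     """
--     for key_names in key_list:
--         if source_key in key_names:
--             return key_list.index(key_names)
--     raise Exception("Invalid key: %s" % source_key)
--
-- def get_key_from_index(index, to_key):
--     """Gets the key at the given internal index.
--     Sharp or flat depends on the target key.
--     >>> get_key_from_index(1, 'Eb')
--     'Bb'
--     """
--     key_names = key_list[index % len(key_list)]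
--     if len(key_names) > 1:
--         sharp_or_flat = sharp_flat.index(sharp_flat_preferences[to_key])  # get #,b index from the preferences
--         return key_names[sharp_or_flat]  #
--     return key_names[0]
--
-- def transpose(source_chord, direction, to_key_param=''):
--     """Transposes a chord a number of half tones.
--     Sharp or flat depends on target key.
--     >>> transpose('C', 3, 'Bb')
--     'Eb'
--     """
--     to_key = to_key_param or source_chord
--     source_index = get_index_from_key(source_chord)
--     return get_key_from_index(source_index + direction, to_key)
--
-- def recursive_line_transpose(source_line, source_chords, direction, to_key):
--     if not source_chords or not source_line:
--         return source_line
--     source_chord = source_chords.pop(0)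
--     chord_index = source_line.find(source_chord)
--     after_chord_index = chord_index + len(source_chord)
--
--     transposed = transpose(source_chord, direction, to_key)
--     rest = recursive_line_transpose(source_line[after_chord_index:], source_chords, direction, to_key)
--     return source_line[:chord_index] + transposed + rest
-- ===== SOURCE B (Python) =====
-- # Iterative re-implementation: loop with an accumulator instead of recursion,
-- # and a precomputed name->index dict instead of scanning key_list per chord.
-- # Like A, it pops consumed chords off the caller's source_chords list in place.
-- key_list = [('A',), ('A#', 'Bb'), ('B',), ('C',), ('C#', 'Db'), ('D',),
--             ('D#', 'Eb'), ('E',), ('F',), ('F#', 'Gb'), ('G',), ('G#', 'Ab')]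
--
-- sharp_flat_preferences = {
--     'A': '#', 'A#': 'b', 'Bb': 'b', 'B': '#', 'C': 'b', 'C#': 'b', 'Db': 'b',
--     'D': '#', 'D#': 'b', 'Eb': 'b', 'E': '#', 'F': 'b', 'F#': '#', 'Gb': '#',
--     'G': '#', 'G#': 'b', 'Ab': 'b',
-- }
--
-- _NAME_TO_INDEX = {name: i for i, names in enumerate(key_list) for name in names}
--
--
-- def _transpose_chord(chord, direction, to_key):
--     if chord not in _NAME_TO_INDEX:
--         raise Exception("Invalid key: %s" % chord)
--     names = key_list[(_NAME_TO_INDEX[chord] + direction) % 12]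
--     if len(names) == 1:
--         return names[0]
--     return names[1] if sharp_flat_preferences[to_key or chord] == 'b' else names[0]
--
--
-- def recursive_line_transpose(source_line, source_chords, direction, to_key):
--     result = ''
--     while source_chords and source_line:
--         chord = source_chords.pop(0)
--         i = source_line.find(chord)
--         result += source_line[:i] + _transpose_chord(chord, direction, to_key)
--         source_line = source_line[i + len(chord):]
--     return result + source_line
-- ===== Notes on version B (the rewrite author's own statement) =====
-- stated objective: alternative
-- what changed: replaces the recursion over the shrinking line with an iterative loop threading an accumulator string, and replaces the per-chord scan of key_list (get_index_from_key) with a name-to-index dict built once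
-- outside the precondition, e.g. on recursive_line_transpose('C', ['C', 'ZZ'], 0, ''): A returns 'C', B returns 'C'; on recursive_line_transpose('C', ['C'], 2, 'zz'): A returns 'D', B returns 'D'
import Mathlib
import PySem

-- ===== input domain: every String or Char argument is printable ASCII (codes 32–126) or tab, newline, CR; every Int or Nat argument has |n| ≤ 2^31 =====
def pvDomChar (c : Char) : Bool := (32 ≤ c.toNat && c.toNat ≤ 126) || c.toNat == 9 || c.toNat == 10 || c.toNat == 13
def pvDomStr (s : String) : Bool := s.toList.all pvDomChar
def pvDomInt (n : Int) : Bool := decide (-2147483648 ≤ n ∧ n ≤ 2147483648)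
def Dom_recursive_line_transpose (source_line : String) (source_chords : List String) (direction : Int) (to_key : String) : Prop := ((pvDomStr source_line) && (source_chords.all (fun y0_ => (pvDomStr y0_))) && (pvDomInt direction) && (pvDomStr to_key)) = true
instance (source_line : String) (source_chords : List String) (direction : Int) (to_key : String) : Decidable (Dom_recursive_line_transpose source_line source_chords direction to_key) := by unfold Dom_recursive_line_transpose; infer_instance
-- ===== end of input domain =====

-- B replaces A's recursion with an accumulator loop and A's key_list scan with a name->index
-- dict built once (objective: alternative). Both Pythons pop consumed chords off the caller's
-- source_chords list in place identically; the equivalence proved here is about the return value.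

-- shared module constants (same literals in both Python files)
def pvKeyList : List (List String) :=
  [["A"], ["A#", "Bb"], ["B"], ["C"], ["C#", "Db"], ["D"],
   ["D#", "Eb"], ["E"], ["F"], ["F#", "Gb"], ["G"], ["G#", "Ab"]]

def pvSharpFlat : List String := ["#", "b"]

def pvPrefs : PySem.Dict String String := PySem.Dict.ofList
  [("A", "#"), ("A#", "b"), ("Bb", "b"), ("B", "#"), ("C", "b"), ("C#", "b"), ("Db", "b"),
   ("D", "#"), ("D#", "b"), ("Eb", "b"), ("E", "#"), ("F", "b"), ("F#", "#"), ("Gb", "#"),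
   ("G", "#"), ("G#", "b"), ("Ab", "b")]

-- ===== PORT A =====
-- get_index_from_key: the for-loop over key_list (none = the final `raise`)
def pvFindNames (k : String) : List (List String) → Option (List String)
  | [] => none
  | names :: rest => if k ∈ names then some names else pvFindNames k rest

def get_index_from_key (k : String) : Option Int :=
  (pvFindNames k pvKeyList).bind fun names =>
    (PySem.List.index? pvKeyList names).map (fun n => (n : Int))

-- key_list[index % len(key_list)]: the index is in [0, 12), so Python's indexing cannot fail;
-- pyGetD with default [] is exact here.  Likewise sharp_flat.index(p) is always found (p is a
-- dict value, '#' or 'b'), so .getD 0 is exact, and key_names[…] is in range.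
def get_key_from_index (index : Int) (toKey : String) : Option String :=
  let names := PySem.List.pyGetD pvKeyList (PySem.Int.mod index (pvKeyList.length : Int)) []
  if 1 < names.length then
    (PySem.Dict.get? pvPrefs toKey).map fun p =>
      PySem.List.pyGetD names (((PySem.List.index? pvSharpFlat p).getD 0 : Nat) : Int) ""
  else some (PySem.List.pyGetD names 0 "")

def transposeA (chord : String) (direction : Int) (toKeyParam : String) : Option String :=
  let toKey := if toKeyParam = "" then chord else toKeyParam   -- to_key_param or source_chord
  (get_index_from_key chord).bind fun i => get_key_from_index (i + direction) toKey

def rltA (line : List Char) : List String → Int → String → List Char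
  | [], _, _ => line
  | c :: rest, dir, key =>
    if line = [] then line
    else
      let ci := PySem.Chars.find line c.toList
      let after := ci + (c.toList.length : Int)
      match transposeA c dir key with
      | none => []   -- Python raises here; excluded by Pre_
      | some t =>
          PySem.List.slice line none (some ci) ++ t.toList
            ++ rltA (PySem.List.slice line (some after) none) rest dir key

def recursive_line_transpose (source_line : String) (source_chords : List String) (direction : Int) (to_key : String) : String :=
  String.ofList (rltA source_line.toList source_chords direction to_key)

-- ===== PORT B =====
-- _NAME_TO_INDEX = {name: i for i, names in enumerate(key_list) for name in names}
def pvNameToIndex : PySem.Dict String Int :=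
  (PySem.List.enumerate pvKeyList 0).foldl
    (fun d p => p.2.foldl (fun d name => PySem.Dict.insert d name p.1) d)
    PySem.Dict.empty

def transposeB (chord : String) (direction : Int) (toKey : String) : Option String :=
  match PySem.Dict.get? pvNameToIndex chord with
  | none => none   -- Python raises here; excluded by Pre_
  | some i =>
      let names := PySem.List.pyGetD pvKeyList (PySem.Int.mod (i + direction) 12) []
      if names.length = 1 then some (PySem.List.pyGetD names 0 "")
      else (PySem.Dict.get? pvPrefs (if toKey = "" then chord else toKey)).map fun p =>
        if p = "b" then PySem.List.pyGetD names 1 "" else PySem.List.pyGetD names 0 ""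

def rltB (result line : List Char) : List String → Int → String → List Char
  | [], _, _ => result ++ line
  | c :: rest, dir, key =>
    if line = [] then result ++ line
    else
      let i := PySem.Chars.find line c.toList
      match transposeB c dir key with
      | none => result   -- Python raises here; excluded by Pre_
      | some t =>
          rltB (result ++ PySem.List.slice line none (some i) ++ t.toList)
               (PySem.List.slice line (some (i + (c.toList.length : Int))) none) rest dir key

def recursive_line_transpose_alt (source_line : String) (source_chords : List String) (direction : Int) (to_key : String) : String :=
  String.ofList (rltB [] source_line.toList source_chords direction to_key)

-- ===== PRECONDITION & SPEC =====
-- Pre_ excludes the inputs on which A raises (Exception for a chord that is not a key name,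
-- KeyError for a target key outside the preference table); because which chords are actually
-- consumed depends on how the line shrinks, it conservatively also excludes some inputs where
-- an invalid chord or to_key is never reached before the line runs out and A returns (cited).
def Pre_recursive_line_transpose (source_line : String) (source_chords : List String) (direction : Int) (to_key : String) : Prop :=
  source_chords = [] ∨ source_line = "" ∨
    ((∀ c ∈ source_chords, c ∈ (["A", "A#", "Bb", "B", "C", "C#", "Db", "D", "D#", "Eb", "E", "F", "F#", "Gb", "G", "G#", "Ab"] : List String)) ∧
     (to_key = "" ∨ to_key ∈ (["A", "A#", "Bb", "B", "C", "C#", "Db", "D", "D#", "Eb", "E", "F", "F#", "Gb", "G", "G#", "Ab"] : List String)))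

instance (source_line : String) (source_chords : List String) (direction : Int) (to_key : String) : Decidable (Pre_recursive_line_transpose source_line source_chords direction to_key) := by unfold Pre_recursive_line_transpose; infer_instance

def pvWitness_recursive_line_transpose : String × List String × Int × String := ("G  C", ["G", "C"], 3, "Bb")

def Spec_recursive_line_transpose (source_line : String) (source_chords : List String) (direction : Int) (to_key : String) (out : String) : Prop := out = recursive_line_transpose_alt source_line source_chords direction to_key
instance (source_line : String) (source_chords : List String) (direction : Int) (to_key : String) (out : String) : Decidable (Spec_recursive_line_transpose source_line source_chords direction to_key out) := by unfold Spec_recursive_line_transpose; infer_instance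

-- ===== CLAIM (what is proved, stated in full; the proofs are below) =====
def Claim_equal_recursive_line_transpose : Prop := ∀ (source_line : String) (source_chords : List String) (direction : Int) (to_key : String), Dom_recursive_line_transpose source_line source_chords direction to_key → Pre_recursive_line_transpose source_line source_chords direction to_key → Spec_recursive_line_transpose source_line source_chords direction to_key (recursive_line_transpose source_line source_chords direction to_key)

-- ===== LEMMAS AND PROOFS =====

-- proof-side shorthand for the valid-key membership used in Pre_
def pvValidKey (s : String) : Prop :=
  s ∈ (["A", "A#", "Bb", "B", "C", "C#", "Db", "D", "D#", "Eb", "E", "F", "F#", "Gb", "G", "G#", "Ab"] : List String)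

-- A's get_key_from_index equals B's name selection, for a valid target key.
theorem pvKeySel (i : Int) (tk : String) (htk : pvValidKey tk) :
    get_key_from_index i tk =
      (let names := PySem.List.pyGetD pvKeyList (PySem.Int.mod i 12) []
       if names.length = 1 then some (PySem.List.pyGetD names 0 "")
       else (PySem.Dict.get? pvPrefs tk).map fun p =>
         if p = "b" then PySem.List.pyGetD names 1 "" else PySem.List.pyGetD names 0 "") := by
  have hlen : (pvKeyList.length : Int) = 12 := by decide
  unfold get_key_from_index
  rw [hlen]
  have h0 : 0 ≤ PySem.Int.mod i 12 := PySem.Int.mod_nonneg i (by norm_num)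
  have h12 : PySem.Int.mod i 12 < 12 := PySem.Int.mod_lt i (by norm_num)
  generalize PySem.Int.mod i 12 = m at *
  unfold pvValidKey at htk
  fin_cases htk <;> (interval_cases m <;> decide)

-- both transposes agree for a valid chord and a valid-or-empty target key
theorem pvTransEq (c : String) (dir : Int) (k : String)
    (hc : pvValidKey c) (hk : k = "" ∨ pvValidKey k) :
    transposeA c dir k = transposeB c dir k := by
  have htk : pvValidKey (if k = "" then c else k) := by
    rcases hk with hk | hk
    · simpa [hk] using hc
    · have hne : k ≠ "" := by intro h; subst h; exact absurd hk (by unfold pvValidKey; decide)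
      simpa [hne] using hk
  have h1 : (get_index_from_key c).isSome := by
    unfold pvValidKey at hc; fin_cases hc <;> decide
  obtain ⟨i, hi⟩ := Option.isSome_iff_exists.mp h1
  have h2 : PySem.Dict.get? pvNameToIndex c = some i := by
    rw [← hi]; unfold pvValidKey at hc; fin_cases hc <;> decide
  unfold transposeA transposeB
  rw [hi, h2]
  simpa using pvKeySel (i + dir) (if k = "" then c else k) htk

-- for a valid chord and valid-or-empty target key, B's transpose returns a value
theorem pvTransSome (c : String) (dir : Int) (k : String)
    (hc : pvValidKey c) (hk : k = "" ∨ pvValidKey k) :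
    ∃ t, transposeB c dir k = some t := by
  have htk : pvValidKey (if k = "" then c else k) := by
    rcases hk with hk | hk
    · simpa [hk] using hc
    · have hne : k ≠ "" := by intro h; subst h; exact absurd hk (by unfold pvValidKey; decide)
      simpa [hne] using hk
  have h1 : (PySem.Dict.get? pvNameToIndex c).isSome := by
    unfold pvValidKey at hc; fin_cases hc <;> decide
  obtain ⟨i, hi⟩ := Option.isSome_iff_exists.mp h1
  generalize hT : (if k = "" then c else k) = tk at htk
  have h2 : (PySem.Dict.get? pvPrefs tk).isSome := by
    unfold pvValidKey at htk; fin_cases htk <;> decide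
  obtain ⟨p, hp⟩ := Option.isSome_iff_exists.mp h2
  by_cases hn : (PySem.List.pyGetD pvKeyList (PySem.Int.mod (i + dir) 12) []).length = 1
  · exact ⟨_, by unfold transposeB; rw [hi]; dsimp only; rw [if_pos hn]⟩
  · exact ⟨_, by unfold transposeB; rw [hi]; dsimp only; rw [if_neg hn, hT, hp]; rfl⟩

-- the accumulator loop of B computes A's recursion with the accumulator prepended
theorem pvLoopEq (chords : List String) (res line : List Char) (dir : Int) (key : String)
    (hch : ∀ c ∈ chords, pvValidKey c) (hk : key = "" ∨ pvValidKey key) :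
    rltB res line chords dir key = res ++ rltA line chords dir key := by
  induction chords generalizing res line with
  | nil => simp [rltA, rltB]
  | cons c rest ih =>
      have hc := hch c (by simp)
      have hrest : ∀ x ∈ rest, pvValidKey x := fun x hx => hch x (by simp [hx])
      by_cases hl : line = []
      · simp [rltA, rltB, hl]
      · obtain ⟨t, ht⟩ := pvTransSome c dir key hc hk
        simp only [rltA, rltB, if_neg hl]
        rw [pvTransEq c dir key hc hk, ht]
        dsimp only
        rw [ih _ _ hrest]
        simp [List.append_assoc]

-- ===== VERDICT (by name: the statement is the Claim_ definition above) =====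
theorem recursive_line_transpose_spec : Claim_equal_recursive_line_transpose := by
  intro line chords dir key _ pre
  unfold Spec_recursive_line_transpose recursive_line_transpose recursive_line_transpose_alt
  rcases pre with h | h | ⟨hch, hk⟩
  · subst h; cases hl : line.toList <;> simp [rltA, rltB]
  · subst h; cases chords <;> simp [rltA, rltB]
  · rw [pvLoopEq chords [] line.toList dir key hch hk, List.nil_append]
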